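-- pv_equiv track=rewrite | github.com/CR-Samrat/drone-based-delivary | plugins/euclidean_obstacles.py | create_route
-- ===== SOURCE A (Python) =====
-- def create_route(pts, extra):
--     lst = pts.copy()
--     idx = 0
--     k = len(lst)
--     for i in range(k):
--         lst.insert(idx, extra)
--         idx +=2
--
--     lst.append(extra)
--     return lst
-- ===== SOURCE B (Python) =====
-- def create_route(pts, extra):
--     lst = pts.copy()
--     k = len(lst)
--     result = [extra] * (2 * k + 1)
--     result[1::2] = lst
--     return result
-- ===== Notes on version B (the rewrite author's own statement) =====
-- stated objective: faster
-- what changed: Replaces the incremental insert-at-moving-index loop plus final append with preallocating the full output filled with the separator and scattering the points into the odd positions via one strided slice assignment.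
import Mathlib
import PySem

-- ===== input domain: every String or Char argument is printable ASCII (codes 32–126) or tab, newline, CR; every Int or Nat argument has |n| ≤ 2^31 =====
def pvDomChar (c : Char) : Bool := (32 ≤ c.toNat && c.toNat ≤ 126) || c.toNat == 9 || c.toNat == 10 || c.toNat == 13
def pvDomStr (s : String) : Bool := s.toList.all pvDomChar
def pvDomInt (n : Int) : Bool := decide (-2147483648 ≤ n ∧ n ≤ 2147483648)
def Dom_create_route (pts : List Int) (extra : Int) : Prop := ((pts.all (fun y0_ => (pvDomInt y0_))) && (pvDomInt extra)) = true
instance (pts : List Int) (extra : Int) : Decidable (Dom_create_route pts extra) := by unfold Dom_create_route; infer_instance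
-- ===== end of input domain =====

-- B builds the separator-interleaved route by preallocating the output and scattering the points
-- into the odd positions (one strided pass) instead of A's repeated mid-list inserts (faster in a timing run).
-- ===== PORT A =====
-- insert separator before each point by repeated list.insert at a moving index, then append
def create_route (pts : List Int) (extra : Int) : List Int :=
  let lst := pts
  let k : Int := (lst.length : Int)
  let s := (PySem.List.pyRange 0 k 1).foldl
    (fun (st : List Int × Int) _ => (PySem.List.insert st.1 st.2 extra, st.2 + 2)) (lst, 0)
  s.1 ++ [extra]

-- ===== PORT B =====
-- hand port of the strided slice assignment `result[1::2] = lst`: keeps the element at each even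
-- position and replaces each odd position by the next element of lst; exact here because the
-- slice has exactly len(lst) slots
def scatterOdd : List Int → List Int → List Int
  | r0 :: _ :: rest, x :: xs => r0 :: x :: scatterOdd rest xs
  | r, _ => r

def create_route_alt (pts : List Int) (extra : Int) : List Int :=
  let lst := pts
  let k := lst.length
  scatterOdd (List.replicate (2 * k + 1) extra) lst


-- ===== PRECONDITION & SPEC =====
def Spec_create_route (pts : List Int) (extra : Int) (out : List Int) : Prop := out = create_route_alt pts extra
instance (pts : List Int) (extra : Int) (out : List Int) : Decidable (Spec_create_route pts extra out) := by unfold Spec_create_route; infer_instance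

-- ===== CLAIM (what is proved, stated in full; the proofs are below) =====
def Claim_equal_create_route : Prop := ∀ (pts : List Int) (extra : Int), Dom_create_route pts extra → Spec_create_route pts extra (create_route pts extra)

-- ===== LEMMAS AND PROOFS =====


-- step function of A's loop (state = (list, idx)); the loop body ignores the range element
def stepA (e : Int) (st : List Int × Int) : List Int × Int :=
  (PySem.List.insert st.1 st.2 e, st.2 + 2)

-- a foldl whose body ignores the element is an iterate
theorem foldl_ignore {α β : Type} (g : α → α) : ∀ (l : List β) (i : α),
    l.foldl (fun s _ => g s) i = g^[l.length] i := by
  intro l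
  induction l with
  | nil => intro i; rfl
  | cons x xs ih =>
      intro i
      simp [List.foldl_cons, ih, Function.iterate_succ_apply]

-- invariant of A's loop: pre is the already-interleaved prefix, idx = pre.length
theorem iterA (e : Int) : ∀ (rest pre : List Int),
    (stepA e)^[rest.length] (pre ++ rest, (pre.length : Int)) =
      (pre ++ rest.flatMap (fun p => [e, p]), (pre.length : Int) + 2 * rest.length) := by
  intro rest
  induction rest with
  | nil => intro pre; simp
  | cons r rs ih =>
      intro pre
      have hins : PySem.List.insert (pre ++ r :: rs) ((pre.length : Int)) e
          = pre ++ e :: r :: rs := by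
        rw [PySem.List.insert_natCast _ _ _ (by simp)]
        simp
      have h1 : (stepA e) (pre ++ r :: rs, (pre.length : Int))
          = ((pre ++ [e, r]) ++ rs, ((pre ++ [e, r]).length : Int)) := by
        simp [stepA, hins]
      rw [List.length_cons, Function.iterate_succ_apply, h1, ih (pre ++ [e, r])]
      simp
      ring

-- B's scatter over a replicate-filled buffer produces the interleaving
theorem scatterB (e : Int) : ∀ (xs : List Int),
    scatterOdd (List.replicate (2 * xs.length + 1) e) xs
      = xs.flatMap (fun p => [e, p]) ++ [e] := by
  intro xs
  induction xs with
  | nil => rfl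
  | cons x xs ih =>
      have h : 2 * (x :: xs).length + 1 = ((2 * xs.length + 1) + 1) + 1 := by
        simp; ring
      rw [h, List.replicate_succ, List.replicate_succ, scatterOdd, ih]
      simp

-- ===== VERDICT (by name: the statement is the Claim_ definition above) =====
theorem create_route_spec : Claim_equal_create_route := by
  intro pts extra _
  show create_route pts extra = create_route_alt pts extra
  have hA := iterA extra pts []
  simp only [List.nil_append, List.length_nil, Nat.cast_zero] at hA
  unfold create_route create_route_alt
  rw [show (fun (st : List Int × Int) (_ : Int) => (PySem.List.insert st.1 st.2 extra, st.2 + 2))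
        = (fun st _ => stepA extra st) from rfl]
  dsimp only
  rw [foldl_ignore (stepA extra)]
  have hlen : (PySem.List.pyRange 0 (pts.length : Int) 1).length = pts.length := by
    simp [PySem.List.length_pyRange_one]
  rw [hlen, hA, scatterB]
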